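-- pv_equiv track=rewrite | github.com/kyleyarwood/advent-of-code | 2019/day6/day6.py | get_num_orbits
-- ===== SOURCE A (Python) =====
-- def get_num_orbits(orbits_map, checksums, planet):
--     if planet not in checksums:
--         if planet not in orbits_map:
--             checksums[planet] = 0
--             return 0
--         num_orbits = 0
--
--         for orbited_planet in orbits_map[planet]:
--             num_orbits += get_num_orbits(orbits_map, checksums, orbited_planet) + 1
--
--         checksums[planet] = num_orbits
--
--     return checksums[planet]
-- ===== SOURCE B (Python) =====
-- def get_num_orbits(orbits_map, checksums, planet):
--     # Bottom-up fixpoint instead of top-down memoized recursion; does not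
--     # mutate the caller's checksums dict (return-value equivalence only).
--     memo = dict(checksums)
--     for _ in range(len(orbits_map)):
--         for node, parents in orbits_map.items():
--             if node in memo:
--                 continue
--             if all(q in memo or q not in orbits_map for q in parents):
--                 memo[node] = sum(memo.get(q, 0) + 1 for q in parents)
--     return memo[planet] if planet in memo else 0
-- ===== Notes on version B (the rewrite author's own statement) =====
-- stated objective: alternative
-- what changed: Replaces A's top-down memoized recursion by a bottom-up Kahn-style fixpoint: repeated passes over the orbit map resolve every node whose parents are already resolved, then the answer is read off the table; no recursion and no mutation of the caller's checksums dict.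
import Mathlib
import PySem

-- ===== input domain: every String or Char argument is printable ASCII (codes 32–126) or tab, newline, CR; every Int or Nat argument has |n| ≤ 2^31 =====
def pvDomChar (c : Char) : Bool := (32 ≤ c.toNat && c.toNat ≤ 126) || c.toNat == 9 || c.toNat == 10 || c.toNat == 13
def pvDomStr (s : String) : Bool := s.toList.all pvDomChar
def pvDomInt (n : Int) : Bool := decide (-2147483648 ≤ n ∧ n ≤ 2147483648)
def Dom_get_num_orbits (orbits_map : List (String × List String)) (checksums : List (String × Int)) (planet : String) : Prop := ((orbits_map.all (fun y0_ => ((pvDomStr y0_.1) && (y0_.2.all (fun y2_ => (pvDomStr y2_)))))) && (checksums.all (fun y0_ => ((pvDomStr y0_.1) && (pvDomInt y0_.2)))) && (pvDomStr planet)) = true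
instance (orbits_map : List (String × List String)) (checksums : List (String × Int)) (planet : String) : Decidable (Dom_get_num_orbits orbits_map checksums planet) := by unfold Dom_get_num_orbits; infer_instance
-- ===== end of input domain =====

-- B replaces A's top-down memoized recursion by a bottom-up fixpoint over the orbit map
-- (objective: alternative). A mutates its `checksums` dict argument, B does not: the
-- equivalence proved here is about the RETURN value only.

-- ===== PORT A =====
-- A's recursion threads the mutated `checksums` dict through the calls; it is ported with
-- a fuel parameter (Python's recursion does not terminate when it reaches a cycle, which
-- Pre_ excludes; on Pre_ the fuel `orbits_map.length + 1` is proved sufficient below).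
mutual
def pvGoA (om : PySem.Dict String (List String)) : Nat → PySem.Dict String Int → String → Option (Int × PySem.Dict String Int)
  | 0, _, _ => none
  | fuel+1, c, p =>
    if c.contains p then
      -- planet in checksums: fall through to `return checksums[planet]`
      some (c.getD p 0, c)
    else if !om.contains p then
      -- checksums[planet] = 0; return 0
      some (0, c.insert p 0)
    else
      -- for orbited_planet in orbits_map[planet]: num_orbits += rec(...) + 1
      match pvGoAFold om fuel c (om.getD p []) 0 with
      | none => none
      | some (n, c') =>
        -- checksums[planet] = num_orbits; return checksums[planet]
        let c2 := c'.insert p n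
        some (c2.getD p 0, c2)
termination_by fuel _ _ => (fuel, 0)
def pvGoAFold (om : PySem.Dict String (List String)) : Nat → PySem.Dict String Int → List String → Int → Option (Int × PySem.Dict String Int)
  | _, c, [], acc => some (acc, c)
  | fuel, c, q :: qs, acc =>
    match pvGoA om fuel c q with
    | none => none
    | some (v, c') => pvGoAFold om fuel c' qs (acc + (v + 1))
termination_by fuel _ qs _ => (fuel, qs.length + 1)
end

def get_num_orbits (orbits_map : List (String × List String)) (checksums : List (String × Int)) (planet : String) : Int :=
  match pvGoA (PySem.Dict.mk orbits_map) (orbits_map.length + 1) (PySem.Dict.mk checksums) planet with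
  | some (v, _) => v
  | none => 0

-- ===== PORT B =====
-- One candidate node of a pass: resolve it if all its parents are resolved.
def pvBStep (om : PySem.Dict String (List String)) (memo : PySem.Dict String Int) (nd : String × List String) : PySem.Dict String Int :=
  if memo.contains nd.1 then memo
  else if nd.2.all (fun q => memo.contains q || !om.contains q) then
    memo.insert nd.1 (nd.2.foldl (fun s q => s + (memo.getD q 0 + 1)) 0)
  else memo

def get_num_orbits_alt (orbits_map : List (String × List String)) (checksums : List (String × Int)) (planet : String) : Int :=
  let om := PySem.Dict.mk orbits_map
  let memo := (List.range orbits_map.length).foldl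
    (fun m _ => orbits_map.foldl (pvBStep om) m) (PySem.Dict.mk checksums)
  if memo.contains planet then memo.getD planet 0 else 0

-- ===== PRECONDITION & SPEC =====
-- Resolvability: iterate "a key is resolved if it is pre-memoized or all its parents are
-- non-keys or already resolved" from the empty set.
def pvStep (orbits_map : List (String × List String)) (checksums : List (String × Int)) (R : List String) : List String :=
  (orbits_map.map Prod.fst).filter (fun p =>
    (PySem.Dict.mk checksums).contains p ||
    ((PySem.Dict.mk orbits_map).getD p []).all
      (fun q => !(PySem.Dict.mk orbits_map).contains q || R.contains q))
def pvResolved (orbits_map : List (String × List String)) (checksums : List (String × Int)) : Nat → List String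
  | 0 => []
  | k+1 => pvStep orbits_map checksums (pvResolved orbits_map checksums k)

-- Pre_ excludes (a) association lists with duplicate keys, which never arise from a Python
-- dict (a corner of the list encoding only), and (b) inputs whose planet is a key that is
-- not resolvable, i.e. the recursion from planet reaches a cycle not cut by the checksums
-- memo: there A raises RecursionError. Maps with cycles elsewhere (unreachable from
-- planet) are INSIDE Pre_ and proved equal.
def Pre_get_num_orbits (orbits_map : List (String × List String)) (checksums : List (String × Int)) (planet : String) : Prop :=
  (orbits_map.map Prod.fst).Nodup ∧
  ((PySem.Dict.mk orbits_map).contains planet = true →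
    planet ∈ pvResolved orbits_map checksums orbits_map.length)
instance (orbits_map : List (String × List String)) (checksums : List (String × Int)) (planet : String) : Decidable (Pre_get_num_orbits orbits_map checksums planet) := by unfold Pre_get_num_orbits; infer_instance

def pvWitness_get_num_orbits : (List (String × List String)) × (List (String × Int)) × String :=
  ([("B", ["A"]), ("C", ["C"])], [], "B")

def Spec_get_num_orbits (orbits_map : List (String × List String)) (checksums : List (String × Int)) (planet : String) (out : Int) : Prop := out = get_num_orbits_alt orbits_map checksums planet
instance (orbits_map : List (String × List String)) (checksums : List (String × Int)) (planet : String) (out : Int) : Decidable (Spec_get_num_orbits orbits_map checksums planet out) := by unfold Spec_get_num_orbits; infer_instance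

-- ===== CLAIM (what is proved, stated in full; the proofs are below) =====
def Claim_equal_get_num_orbits : Prop := ∀ (orbits_map : List (String × List String)) (checksums : List (String × Int)) (planet : String), Dom_get_num_orbits orbits_map checksums planet → Pre_get_num_orbits orbits_map checksums planet → Spec_get_num_orbits orbits_map checksums planet (get_num_orbits orbits_map checksums planet)

-- ===== LEMMAS AND PROOFS =====

def pvValF (om : PySem.Dict String (List String)) (c0 : PySem.Dict String Int) : Nat → String → Int
  | 0, _ => 0
  | f+1, p =>
    if c0.contains p then c0.getD p 0
    else if om.contains p then ((om.getD p []).map (fun q => pvValF om c0 f q + 1)).sum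
    else 0

def pvV (omap : List (String × List String)) (cs : List (String × Int)) (p : String) : Int :=
  pvValF (PySem.Dict.mk omap) (PySem.Dict.mk cs) (omap.length + 2) p

theorem pv_contains_mk {ν : Type} (l : List (String × ν)) (p : String) :
    (PySem.Dict.mk l).contains p = true ↔ p ∈ l.map Prod.fst := by
  rw [PySem.Dict.contains_eq_decide_mem_keys]
  simp [PySem.Dict.keys]

theorem pv_mem_resolved_succ (omap : List (String × List String)) (cs : List (String × Int)) (k : Nat) (p : String) :
    p ∈ pvResolved omap cs (k+1) ↔
      p ∈ omap.map Prod.fst ∧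
      ((PySem.Dict.mk cs).contains p = true ∨
        ∀ q ∈ (PySem.Dict.mk omap).getD p [],
          (PySem.Dict.mk omap).contains q = false ∨ q ∈ pvResolved omap cs k) := by
  simp [pvResolved, pvStep, List.mem_filter, List.all_eq_true]

theorem pv_resolved_succ_subset (omap : List (String × List String)) (cs : List (String × Int)) :
    ∀ k p, p ∈ pvResolved omap cs k → p ∈ pvResolved omap cs (k+1) := by
  intro k
  induction k with
  | zero => intro p hp; simp [pvResolved] at hp
  | succ k ih =>
    intro p hp
    rw [pv_mem_resolved_succ] at hp ⊢
    refine ⟨hp.1, ?_⟩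
    rcases hp.2 with h0 | hall
    · exact Or.inl h0
    · refine Or.inr fun q hq => ?_
      rcases hall q hq with h | h
      · exact Or.inl h
      · exact Or.inr (ih q h)

theorem pv_resolved_mono (omap : List (String × List String)) (cs : List (String × Int))
    {k m : Nat} (hkm : k ≤ m) : ∀ p, p ∈ pvResolved omap cs k → p ∈ pvResolved omap cs m := by
  obtain ⟨d, rfl⟩ := Nat.exists_eq_add_of_le hkm
  induction d with
  | zero => intro p h; exact h
  | succ d ih =>
    intro p h
    exact pv_resolved_succ_subset omap cs (k+d) p (ih (by omega) p h)

theorem pvValF_succ (om : PySem.Dict String (List String)) (c0 : PySem.Dict String Int) (f : Nat) (p : String) :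
    pvValF om c0 (f+1) p
      = if c0.contains p then c0.getD p 0
        else if om.contains p then ((om.getD p []).map (fun q => pvValF om c0 f q + 1)).sum
        else 0 := rfl

theorem pv_stab (omap : List (String × List String)) (cs : List (String × Int)) :
    ∀ k p, ((PySem.Dict.mk omap).contains p = false ∨ p ∈ pvResolved omap cs k) →
    ∀ f, k ≤ f →
    pvValF (PySem.Dict.mk omap) (PySem.Dict.mk cs) (f+1) p
      = pvValF (PySem.Dict.mk omap) (PySem.Dict.mk cs) (k+1) p := by
  intro k
  induction k with
  | zero =>
    intro p hp f _
    rcases hp with hk | hmem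
    · rw [pvValF_succ, pvValF_succ]; simp [hk]
    · simp [pvResolved] at hmem
  | succ k ih =>
    intro p hp f hf
    rcases hp with hk | hmem
    · rw [pvValF_succ, pvValF_succ]; simp [hk]
    · rw [pv_mem_resolved_succ] at hmem
      obtain ⟨hkeys, hrest⟩ := hmem
      by_cases hc0 : (PySem.Dict.mk cs).contains p = true
      · rw [pvValF_succ, pvValF_succ]; simp [hc0]
      · rcases hrest with hc0' | hall
        · exact absurd hc0' hc0
        · have hkey : (PySem.Dict.mk omap).contains p = true := (pv_contains_mk omap p).mpr hkeys
          obtain ⟨f', rfl⟩ : ∃ f', f = f' + 1 := ⟨f - 1, by omega⟩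
          rw [pvValF_succ, pvValF_succ, if_neg hc0, if_neg hc0, if_pos hkey, if_pos hkey]
          congr 1
          apply List.map_congr_left
          intro q hq
          rw [ih q (hall q hq) f' (by omega)]

theorem pv_val_c0 (omap : List (String × List String)) (cs : List (String × Int)) (p : String)
    (h : (PySem.Dict.mk cs).contains p = true) :
    pvV omap cs p = (PySem.Dict.mk cs).getD p 0 := by
  show pvValF (PySem.Dict.mk omap) (PySem.Dict.mk cs) (omap.length+1+1) p = _
  rw [pvValF_succ]; simp [h]

theorem pv_val_leaf (omap : List (String × List String)) (cs : List (String × Int)) (p : String)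
    (hk : (PySem.Dict.mk omap).contains p = false) (hc : (PySem.Dict.mk cs).contains p = false) :
    pvV omap cs p = 0 := by
  show pvValF (PySem.Dict.mk omap) (PySem.Dict.mk cs) (omap.length+1+1) p = 0
  rw [pvValF_succ]; simp [hk, hc]

theorem pv_val_key (omap : List (String × List String)) (cs : List (String × Int))
    (p : String) (k : Nat) (hmem : p ∈ pvResolved omap cs (k+1)) (hkL : k ≤ omap.length)
    (hc : (PySem.Dict.mk cs).contains p = false) :
    pvV omap cs p = (((PySem.Dict.mk omap).getD p []).map (fun q => pvV omap cs q + 1)).sum := by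
  rw [pv_mem_resolved_succ] at hmem
  obtain ⟨hkeys, hrest⟩ := hmem
  have hk : (PySem.Dict.mk omap).contains p = true := (pv_contains_mk omap p).mpr hkeys
  have hall : ∀ q ∈ (PySem.Dict.mk omap).getD p [],
      (PySem.Dict.mk omap).contains q = false ∨ q ∈ pvResolved omap cs k := by
    rcases hrest with h0 | h
    · rw [h0] at hc; exact absurd hc (by simp)
    · exact h
  have hstep : pvV omap cs p
      = (((PySem.Dict.mk omap).getD p []).map
          (fun q => pvValF (PySem.Dict.mk omap) (PySem.Dict.mk cs) (omap.length + 1) q + 1)).sum := by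
    show pvValF (PySem.Dict.mk omap) (PySem.Dict.mk cs) ((omap.length + 1) + 1) p = _
    rw [pvValF_succ]; simp [hk, hc]
  rw [hstep]
  congr 1
  apply List.map_congr_left
  intro q hq
  have h1 := pv_stab omap cs k q (hall q hq) omap.length (by omega)
  have h2 := pv_stab omap cs k q (hall q hq) (omap.length + 1) (by omega)
  have hv : pvV omap cs q = pvValF (PySem.Dict.mk omap) (PySem.Dict.mk cs) (omap.length + 1) q := by
    show pvValF (PySem.Dict.mk omap) (PySem.Dict.mk cs) ((omap.length+1)+1) q = _
    rw [h2, ← h1]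
  omega

def pvInv (omap : List (String × List String)) (cs : List (String × Int)) (c : PySem.Dict String Int) : Prop :=
  (∀ q, c.contains q = true → c.getD q 0 = pvV omap cs q) ∧
  (∀ q, (PySem.Dict.mk cs).contains q = true → c.contains q = true)

theorem pv_inv_insert (omap : List (String × List String)) (cs : List (String × Int))
    (c : PySem.Dict String Int) (p : String) (v : Int)
    (hinv : pvInv omap cs c) (hv : v = pvV omap cs p) :
    pvInv omap cs (c.insert p v) := by
  constructor
  · intro q hq
    rw [PySem.Dict.getD_insert]
    by_cases hqp : q = p
    · simpa [hqp] using hv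
    · rw [if_neg hqp]
      apply hinv.1
      rw [PySem.Dict.contains_insert] at hq
      simpa [hqp] using hq
  · intro q hq
    rw [PySem.Dict.contains_insert]
    simp [hinv.2 q hq]

theorem pv_goA_base (omap : List (String × List String)) (cs : List (String × Int))
    (fuel : Nat) (c : PySem.Dict String Int) (p : String)
    (hinv : pvInv omap cs c)
    (h : c.contains p = true ∨ (PySem.Dict.mk omap).contains p = false) :
    ∃ c', pvGoA (PySem.Dict.mk omap) (fuel+1) c p = some (pvV omap cs p, c') ∧ pvInv omap cs c' := by
  by_cases hc : c.contains p = true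
  · refine ⟨c, ?_, hinv⟩
    rw [pvGoA, if_pos hc, hinv.1 p hc]
  · have hk : (PySem.Dict.mk omap).contains p = false := by
      rcases h with h | h
      · exact absurd h hc
      · exact h
    have hc0 : (PySem.Dict.mk cs).contains p = false := by
      by_cases h0 : (PySem.Dict.mk cs).contains p = true
      · exact absurd (hinv.2 p h0) hc
      · simp only [Bool.not_eq_true] at h0
        exact h0
    refine ⟨c.insert p 0, ?_, pv_inv_insert omap cs c p 0 hinv (pv_val_leaf omap cs p hk hc0).symm⟩
    rw [pvGoA, if_neg hc, if_pos (by simp [hk]), pv_val_leaf omap cs p hk hc0]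

theorem pv_goA_spec (omap : List (String × List String)) (cs : List (String × Int)) :
    ∀ k, k ≤ omap.length →
    ∀ p, ((PySem.Dict.mk omap).contains p = false ∨ p ∈ pvResolved omap cs k) →
    ∀ fuel c, k < fuel → pvInv omap cs c →
    ∃ c', pvGoA (PySem.Dict.mk omap) fuel c p = some (pvV omap cs p, c') ∧ pvInv omap cs c' := by
  intro k
  induction k with
  | zero =>
    intro _ p hp fuel c hfc hinv
    obtain ⟨f, rfl⟩ : ∃ f, fuel = f + 1 := ⟨fuel - 1, by omega⟩
    apply pv_goA_base omap cs f c p hinv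
    rcases hp with hk | hmem
    · exact Or.inr hk
    · simp [pvResolved] at hmem
  | succ k ih =>
    intro hkL p hp fuel c hfc hinv
    obtain ⟨f, rfl⟩ : ∃ f, fuel = f + 1 := ⟨fuel - 1, by omega⟩
    by_cases hc : c.contains p = true
    · exact pv_goA_base omap cs f c p hinv (Or.inl hc)
    · by_cases hk : (PySem.Dict.mk omap).contains p = true
      swap
      · refine pv_goA_base omap cs f c p hinv (Or.inr ?_)
        simp only [Bool.not_eq_true] at hk
        exact hk
      · rcases hp with hkf | hmem
        · rw [hkf] at hk; exact absurd hk (by simp)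
        · have hval := pv_val_key omap cs p k hmem (by omega)
          rw [pv_mem_resolved_succ] at hmem
          obtain ⟨hkeys, hrest⟩ := hmem
          have hc0 : (PySem.Dict.mk cs).contains p = false := by
            by_cases h0 : (PySem.Dict.mk cs).contains p = true
            · exact absurd (hinv.2 p h0) hc
            · simp only [Bool.not_eq_true] at h0
              exact h0
          rcases hrest with h0 | hall
          · rw [h0] at hc0; exact absurd hc0 (by simp)
          · have hfold : ∀ qs, (∀ q ∈ qs, (PySem.Dict.mk omap).contains q = false ∨ q ∈ pvResolved omap cs k) →
                ∀ c acc, pvInv omap cs c →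
                ∃ c', pvGoAFold (PySem.Dict.mk omap) f c qs acc
                    = some (acc + (qs.map (fun q => pvV omap cs q + 1)).sum, c') ∧ pvInv omap cs c' := by
              intro qs
              induction qs with
              | nil => intro _ c acc hi; exact ⟨c, by simp [pvGoAFold], hi⟩
              | cons q qs ihq =>
                intro hq c acc hi
                obtain ⟨c1, he1, hi1⟩ := ih (by omega) q (hq q (List.mem_cons_self ..)) f c (by omega) hi
                obtain ⟨c2, he2, hi2⟩ :=
                  ihq (fun r hr => hq r (List.mem_cons_of_mem _ hr)) c1 (acc + (pvV omap cs q + 1)) hi1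
                refine ⟨c2, ?_, hi2⟩
                have hsum : acc + (pvV omap cs q + 1) + (List.map (fun q => pvV omap cs q + 1) qs).sum
                    = acc + (List.map (fun q => pvV omap cs q + 1) (q :: qs)).sum := by
                  rw [List.map_cons, List.sum_cons]; ring
                rw [pvGoAFold, he1]
                dsimp only
                rw [he2, hsum]
            obtain ⟨c', he, hi'⟩ := hfold ((PySem.Dict.mk omap).getD p []) hall c 0 hinv
            refine ⟨c'.insert p (0 + (((PySem.Dict.mk omap).getD p []).map (fun q => pvV omap cs q + 1)).sum), ?_, ?_⟩
            · rw [pvGoA, if_neg hc, if_neg (by simp [hk]), he]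
              dsimp only
              rw [PySem.Dict.getD_insert_self]
              rw [zero_add, ← hval hc0]
            · apply pv_inv_insert omap cs c' p _ hi'
              rw [zero_add, ← hval hc0]

-- ----- B side: counting resolved keys bounds the resolution level of every memo entry -----
def pvCnt (omap : List (String × List String)) (c : PySem.Dict String Int) : Nat :=
  ((omap.map Prod.fst).filter (fun q => c.contains q)).length

def pvInvB (omap : List (String × List String)) (cs : List (String × Int)) (c : PySem.Dict String Int) : Prop :=
  pvInv omap cs c ∧
  ∀ q, c.contains q = true →
    (PySem.Dict.mk cs).contains q = true ∨ q ∈ pvResolved omap cs (pvCnt omap c)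

theorem pv_cnt_le (omap : List (String × List String)) (c : PySem.Dict String Int) :
    pvCnt omap c ≤ omap.length := by
  unfold pvCnt
  calc ((omap.map Prod.fst).filter (fun q => c.contains q)).length
      ≤ (omap.map Prod.fst).length := List.length_filter_le _ _
    _ = omap.length := List.length_map ..

theorem pv_cnt_pos (omap : List (String × List String)) (c : PySem.Dict String Int) (q : String)
    (hq : q ∈ omap.map Prod.fst) (hc : c.contains q = true) : 1 ≤ pvCnt omap c := by
  have : q ∈ (omap.map Prod.fst).filter (fun r => c.contains r) := List.mem_filter.mpr ⟨hq, hc⟩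
  have := List.length_pos_of_mem this
  unfold pvCnt
  omega

theorem pv_filter_or_len (p0 : String) (pred : String → Bool) (hp : pred p0 = false) :
    ∀ l : List String,
      (l.filter (fun q => (q == p0) || pred q)).length = (l.filter pred).length + l.count p0 := by
  intro l
  induction l with
  | nil => simp
  | cons a l ih =>
    by_cases ha : a = p0
    · subst ha
      simp only [List.filter_cons, List.count_cons]
      simp [hp, ih]
      omega
    · simp only [List.filter_cons, List.count_cons]
      by_cases hpa : pred a = true
      · simp [ha, hpa, ih]
        omega
      · simp only [Bool.not_eq_true] at hpa
        simp [ha, hpa, ih]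

theorem pv_cnt_insert (omap : List (String × List String)) (c : PySem.Dict String Int)
    (p : String) (v : Int) (hc : c.contains p = false) :
    pvCnt omap (c.insert p v) = pvCnt omap c + (omap.map Prod.fst).count p := by
  unfold pvCnt
  have hcong : (omap.map Prod.fst).filter (fun q => (c.insert p v).contains q)
      = (omap.map Prod.fst).filter (fun q => (q == p) || c.contains q) := by
    apply List.filter_congr
    intro x _
    rw [PySem.Dict.contains_insert]
  rw [hcong, pv_filter_or_len p _ hc]

theorem pv_bstep_mono (omap : List (String × List String)) (c : PySem.Dict String Int)
    (nd : String × List String) (q : String) (h : c.contains q = true) :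
    (pvBStep (PySem.Dict.mk omap) c nd).contains q = true := by
  unfold pvBStep
  split_ifs with h1 h2
  · exact h
  · rw [PySem.Dict.contains_insert]; simp [h]
  · exact h

theorem pv_bfold_mono (omap : List (String × List String)) :
    ∀ (L : List (String × List String)) (c : PySem.Dict String Int) (q : String),
    c.contains q = true → (L.foldl (pvBStep (PySem.Dict.mk omap)) c).contains q = true := by
  intro L
  induction L with
  | nil => intro c q h; simpa using h
  | cons nd L ihL =>
    intro c q h
    rw [List.foldl_cons]
    exact ihL _ q (pv_bstep_mono omap c nd q h)

theorem pv_bstep_inv (omap : List (String × List String)) (cs : List (String × Int))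
    (hnd : (omap.map Prod.fst).Nodup)
    (c : PySem.Dict String Int) (nd : String × List String) (hmem : nd ∈ omap)
    (hinv : pvInvB omap cs c) :
    pvInvB omap cs (pvBStep (PySem.Dict.mk omap) c nd) := by
  obtain ⟨⟨hval, hcs⟩, hlev⟩ := hinv
  unfold pvBStep
  split_ifs with h1 h2
  · exact ⟨⟨hval, hcs⟩, hlev⟩
  · have hpar : (PySem.Dict.mk omap).getD nd.1 [] = nd.2 := by
      apply PySem.Dict.getD_of_mem_items (PySem.Dict.mk omap) _ hnd
      simpa using hmem
    have hkeys1 : nd.1 ∈ omap.map Prod.fst := List.mem_map_of_mem hmem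
    have hkey : (PySem.Dict.mk omap).contains nd.1 = true := (pv_contains_mk omap nd.1).mpr hkeys1
    have hc1 : c.contains nd.1 = false := by
      by_cases h0 : c.contains nd.1 = true
      · exact absurd h0 h1
      · simp only [Bool.not_eq_true] at h0
        exact h0
    have hc0 : (PySem.Dict.mk cs).contains nd.1 = false := by
      by_cases h0 : (PySem.Dict.mk cs).contains nd.1 = true
      · exact absurd (hcs nd.1 h0) h1
      · simp only [Bool.not_eq_true] at h0
        exact h0
    -- every parent is a non-key or resolved within pvCnt c rounds
    have hparents : ∀ q ∈ nd.2,
        (PySem.Dict.mk omap).contains q = false ∨ q ∈ pvResolved omap cs (pvCnt omap c) := by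
      intro q hq
      have h2q := (List.all_eq_true.mp h2) q hq
      simp only [Bool.or_eq_true, Bool.not_eq_true'] at h2q
      rcases h2q with hcq | hkq
      · rcases hlev q hcq with hcsq | hr
        · by_cases hqk : (PySem.Dict.mk omap).contains q = true
          · right
            have hqkeys : q ∈ omap.map Prod.fst := (pv_contains_mk omap q).mp hqk
            have hpos : 1 ≤ pvCnt omap c := pv_cnt_pos omap c q hqkeys hcq
            have hrw : pvCnt omap c = (pvCnt omap c - 1) + 1 := by omega
            rw [hrw, pv_mem_resolved_succ]
            exact ⟨hqkeys, Or.inl hcsq⟩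
          · left
            simp only [Bool.not_eq_true] at hqk
            exact hqk
        · exact Or.inr hr
      · exact Or.inl hkq
    have hmemres : nd.1 ∈ pvResolved omap cs (pvCnt omap c + 1) := by
      rw [pv_mem_resolved_succ]
      refine ⟨hkeys1, Or.inr ?_⟩
      rw [hpar]
      exact hparents
    have hcount : 1 ≤ (omap.map Prod.fst).count nd.1 := List.count_pos_iff.mpr hkeys1
    have hcins := pv_cnt_insert omap c nd.1
      (nd.2.foldl (fun s q => s + (c.getD q 0 + 1)) 0) hc1
    have hcle := pv_cnt_le omap (c.insert nd.1 (nd.2.foldl (fun s q => s + (c.getD q 0 + 1)) 0))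
    have hbound : pvCnt omap c + 1 ≤ omap.length := by omega
    have hvalue : nd.2.foldl (fun s q => s + (c.getD q 0 + 1)) 0 = pvV omap cs nd.1 := by
      rw [PySem.List.foldl_add (g := fun q => c.getD q 0 + 1), zero_add]
      rw [pv_val_key omap cs nd.1 (pvCnt omap c) hmemres (by omega) hc0, hpar]
      apply congrArg
      apply List.map_congr_left
      intro q hq
      have h2q := (List.all_eq_true.mp h2) q hq
      simp only [Bool.or_eq_true, Bool.not_eq_true'] at h2q
      rcases h2q with hcq | hkq
      · rw [hval q hcq]
      · by_cases hx : c.contains q = true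
        · rw [hval q hx]
        · have hxf : c.contains q = false := by
            simp only [Bool.not_eq_true] at hx
            exact hx
          have hc0q : (PySem.Dict.mk cs).contains q = false := by
            by_cases h0 : (PySem.Dict.mk cs).contains q = true
            · exact absurd (hcs q h0) hx
            · simp only [Bool.not_eq_true] at h0
              exact h0
          rw [PySem.Dict.getD_of_not_contains c 0 hxf, pv_val_leaf omap cs q hkq hc0q]
    refine ⟨pv_inv_insert omap cs c nd.1 _ ⟨hval, hcs⟩ hvalue, ?_⟩
    intro q hq
    rw [PySem.Dict.contains_insert] at hq
    simp only [Bool.or_eq_true, beq_iff_eq] at hq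
    have hmono : ∀ r k, k ≤ pvCnt omap c + 1 → r ∈ pvResolved omap cs k →
        r ∈ pvResolved omap cs (pvCnt omap (c.insert nd.1 (nd.2.foldl (fun s q => s + (c.getD q 0 + 1)) 0))) := by
      intro r k hk hr
      exact pv_resolved_mono omap cs (by omega) r hr
    rcases hq with hq | hq
    · subst hq
      exact Or.inr (hmono nd.1 (pvCnt omap c + 1) (by omega) hmemres)
    · rcases hlev q hq with hcsq | hr
      · exact Or.inl hcsq
      · exact Or.inr (hmono q (pvCnt omap c) (by omega) hr)
  · exact ⟨⟨hval, hcs⟩, hlev⟩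

theorem pv_bfold_inv (omap : List (String × List String)) (cs : List (String × Int))
    (hnd : (omap.map Prod.fst).Nodup) :
    ∀ (L : List (String × List String)), (∀ nd ∈ L, nd ∈ omap) →
    ∀ c, pvInvB omap cs c → pvInvB omap cs (L.foldl (pvBStep (PySem.Dict.mk omap)) c) := by
  intro L
  induction L with
  | nil => intro _ c h; simpa using h
  | cons nd L ihL =>
    intro hL c h
    rw [List.foldl_cons]
    exact ihL (fun x hx => hL x (List.mem_cons_of_mem _ hx)) _
      (pv_bstep_inv omap cs hnd c nd (hL nd (List.mem_cons_self ..)) h)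

theorem pv_bfold_mem (omap : List (String × List String)) :
    ∀ (L : List (String × List String)) (c : PySem.Dict String Int) (p : String) (ps : List String),
    (p, ps) ∈ L →
    (∀ q ∈ ps, c.contains q = true ∨ (PySem.Dict.mk omap).contains q = false) →
    (L.foldl (pvBStep (PySem.Dict.mk omap)) c).contains p = true := by
  intro L
  induction L with
  | nil => intro c p ps h; simp at h
  | cons nd L ihL =>
    intro c p ps hmem hq
    rw [List.foldl_cons]
    rcases List.mem_cons.mp hmem with heq | htail
    · apply pv_bfold_mono
      rw [← heq]
      unfold pvBStep
      split_ifs with h1 h2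
      · exact h1
      · exact PySem.Dict.contains_insert_self ..
      · exfalso
        apply h2
        rw [List.all_eq_true]
        intro q hqm
        rcases hq q hqm with hcq | hkq
        · simp [hcq]
        · simp [hkq]
    · apply ihL _ p ps htail
      intro q hqm
      rcases hq q hqm with hcq | hkq
      · exact Or.inl (pv_bstep_mono omap c nd q hcq)
      · exact Or.inr hkq

theorem pv_iter_spec (omap : List (String × List String)) (cs : List (String × Int))
    (hnd : (omap.map Prod.fst).Nodup) :
    ∀ n, pvInvB omap cs ((List.range n).foldl
        (fun m _ => omap.foldl (pvBStep (PySem.Dict.mk omap)) m) (PySem.Dict.mk cs)) ∧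
      (∀ p ∈ pvResolved omap cs n,
        ((List.range n).foldl (fun m _ => omap.foldl (pvBStep (PySem.Dict.mk omap)) m)
          (PySem.Dict.mk cs)).contains p = true) := by
  intro n
  induction n with
  | zero =>
    constructor
    · exact ⟨⟨fun q hq => (pv_val_c0 omap cs q hq).symm, fun q hq => hq⟩,
        fun q hq => Or.inl hq⟩
    · intro p hp; simp [pvResolved] at hp
  | succ n ihn =>
    rw [List.range_succ, List.foldl_append, List.foldl_cons, List.foldl_nil]
    obtain ⟨hinvN, hmemN⟩ := ihn
    constructor
    · exact pv_bfold_inv omap cs hnd omap (fun _ h => h) _ hinvN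
    · intro p hp
      rw [pv_mem_resolved_succ] at hp
      obtain ⟨hkeys, hrest⟩ := hp
      rcases hrest with hc0 | hall
      · exact pv_bfold_mono omap omap _ p (hinvN.1.2 p hc0)
      · obtain ⟨nd, hndm, hnd1⟩ := List.mem_map.mp hkeys
        have hpar : (PySem.Dict.mk omap).getD p [] = nd.2 := by
          apply PySem.Dict.getD_of_mem_items (PySem.Dict.mk omap) _ hnd
          rw [← hnd1]
          simpa using hndm
        apply pv_bfold_mem omap omap _ p nd.2
        · rw [← hnd1]
          simpa using hndm
        · intro q hq
          rcases hall q (hpar ▸ hq) with hkq | hmq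
          · exact Or.inr hkq
          · exact Or.inl (hmemN q hmq)

theorem pv_main (omap : List (String × List String)) (cs : List (String × Int)) (planet : String)
    (hnd : (omap.map Prod.fst).Nodup)
    (hres : (PySem.Dict.mk omap).contains planet = true →
      planet ∈ pvResolved omap cs omap.length) :
    get_num_orbits omap cs planet = get_num_orbits_alt omap cs planet := by
  have hinv0 : pvInv omap cs (PySem.Dict.mk cs) :=
    ⟨fun q hq => (pv_val_c0 omap cs q hq).symm, fun q hq => hq⟩
  have hp : (PySem.Dict.mk omap).contains planet = false ∨ planet ∈ pvResolved omap cs omap.length := by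
    by_cases hx : (PySem.Dict.mk omap).contains planet = true
    · exact Or.inr (hres hx)
    · simp only [Bool.not_eq_true] at hx
      exact Or.inl hx
  obtain ⟨c', he, _⟩ := pv_goA_spec omap cs omap.length (by omega) planet hp (omap.length + 1)
    (PySem.Dict.mk cs) (by omega) hinv0
  obtain ⟨hinvN, hmemN⟩ := pv_iter_spec omap cs hnd omap.length
  unfold get_num_orbits get_num_orbits_alt
  rw [he]
  dsimp only
  by_cases hcp : ((List.range omap.length).foldl
      (fun m _ => omap.foldl (pvBStep (PySem.Dict.mk omap)) m) (PySem.Dict.mk cs)).contains planet = true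
  · rw [if_pos hcp, hinvN.1.1 planet hcp]
  · rw [if_neg hcp]
    have hkey : (PySem.Dict.mk omap).contains planet = false := by
      by_cases hx : (PySem.Dict.mk omap).contains planet = true
      · exact absurd (hmemN planet (hres hx)) hcp
      · simp only [Bool.not_eq_true] at hx
        exact hx
    have hc0 : (PySem.Dict.mk cs).contains planet = false := by
      by_cases hx : (PySem.Dict.mk cs).contains planet = true
      · exact absurd (hinvN.1.2 planet hx) hcp
      · simp only [Bool.not_eq_true] at hx
        exact hx
    exact pv_val_leaf omap cs planet hkey hc0

-- ===== VERDICT (by name: the statement is the Claim_ definition above) =====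
theorem get_num_orbits_spec : Claim_equal_get_num_orbits := by
  intro orbits_map checksums planet _ hpre
  unfold Spec_get_num_orbits
  exact pv_main orbits_map checksums planet hpre.1 hpre.2
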